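-- pv_equiv track=rewrite | github.com/Blackgaurd/Competitive-Programming | DMOJ/CCC/Bananas.py | find_s
-- ===== SOURCE A (Python) =====
-- def find_s(t: str) -> int:
--     b = 0
--     for i in range(len(t)):
--         if t[i] == "B":
--             b += 1
--         elif t[i] == "S":
--             if b == 1:
--                 return i
--             b -= 1
--
--     return -1
-- ===== SOURCE B (Python) =====
-- def find_s(t: str) -> int:
--     # Build prefix-balance table: pre[i] = (#B - #S) among t[:i].
--     pre = [0]
--     for c in t:
--         pre.append(pre[-1] + (1 if c == "B" else -1 if c == "S" else 0))
--     # Scan for the first 'S' whose preceding balance is exactly 1.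
--     for i, c in enumerate(t):
--         if c == "S" and pre[i] == 1:
--             return i
--     return -1
-- ===== Notes on version B (the rewrite author's own statement) =====
-- stated objective: alternative
-- what changed: Replaces the single running-counter loop with early return by a materialised prefix-balance table built in one pass plus a separate scan returning the first sell position whose preceding balance equals 1.
import Mathlib
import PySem

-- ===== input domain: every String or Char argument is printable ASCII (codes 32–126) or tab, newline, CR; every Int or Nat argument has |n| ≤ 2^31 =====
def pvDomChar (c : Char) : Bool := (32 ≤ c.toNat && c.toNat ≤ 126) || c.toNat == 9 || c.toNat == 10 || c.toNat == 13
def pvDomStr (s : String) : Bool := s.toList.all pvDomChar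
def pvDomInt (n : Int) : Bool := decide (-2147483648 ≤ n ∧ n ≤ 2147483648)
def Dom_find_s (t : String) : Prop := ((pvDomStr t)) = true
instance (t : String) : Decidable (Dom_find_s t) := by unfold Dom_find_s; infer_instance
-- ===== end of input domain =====

-- B builds a materialised prefix-balance table then scans it in a second pass (alternative decomposition, same O(n) cost).


-- ===== PORT A =====
-- A's loop: index i, running counter b; early return on 'S' when b = 1.
def findSLoopA : List Char → Int → Int → Int
  | [], _, _ => -1
  | c :: rest, i, b =>
    if c = 'B' then findSLoopA rest (i + 1) (b + 1)
    else if c = 'S' then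
      (if b = 1 then i else findSLoopA rest (i + 1) (b - 1))
    else findSLoopA rest (i + 1) b

def find_s (t : String) : Int := findSLoopA t.toList 0 0

-- ===== PORT B =====
def pvDelta (c : Char) : Int := if c = 'B' then 1 else if c = 'S' then -1 else 0

-- the prefix-balance table pre, with pre[i] = balance of t[:i] (built as Source B's first loop does)
def pvPreTable (cs : List Char) : List Int := cs.scanl (fun a c => a + pvDelta c) 0

-- Source B's second loop: walk the string and the table together
def pvScanFind : List Char → List Int → Int → Int
  | c :: cs, p :: ps, i => if c = 'S' ∧ p = 1 then i else pvScanFind cs ps (i + 1)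
  | _, _, _ => -1

def find_s_alt (t : String) : Int := pvScanFind t.toList (pvPreTable t.toList) 0

-- ===== PRECONDITION & SPEC =====
def Spec_find_s (t : String) (out : Int) : Prop := out = find_s_alt t
instance (t : String) (out : Int) : Decidable (Spec_find_s t out) := by unfold Spec_find_s; infer_instance

-- ===== CLAIM (what is proved, stated in full; the proofs are below) =====
def Claim_equal_find_s : Prop := ∀ (t : String), Dom_find_s t → Spec_find_s t (find_s t)

-- ===== LEMMAS AND PROOFS =====
theorem findSLoopA_eq_scan (cs : List Char) :
    ∀ (i b : Int), findSLoopA cs i b = pvScanFind cs (cs.scanl (fun a c => a + pvDelta c) b) i := by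
  induction cs with
  | nil => intro i b; simp [findSLoopA, pvScanFind, List.scanl_nil]
  | cons c rest ih =>
    intro i b
    rw [List.scanl_cons]
    by_cases hB : c = 'B'
    · have hd : b + pvDelta c = b + 1 := by simp [pvDelta, hB]
      rw [hd]
      simp [findSLoopA, pvScanFind, hB, ih]
    · by_cases hS : c = 'S'
      · have hd : b + pvDelta c = b - 1 := by simp [pvDelta, hB, hS]; ring
        rw [hd]
        by_cases hb : b = 1
        · simp [findSLoopA, pvScanFind, hB, hS, hb]
        · simp [findSLoopA, pvScanFind, hB, hS, hb, ih]
      · have hd : b + pvDelta c = b := by simp [pvDelta, hB, hS]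
        rw [hd]
        simp [findSLoopA, pvScanFind, hB, hS, ih]

-- ===== VERDICT (by name: the statement is the Claim_ definition above) =====
theorem find_s_spec : Claim_equal_find_s := by
  intro t _
  unfold Spec_find_s find_s find_s_alt pvPreTable
  exact findSLoopA_eq_scan t.toList 0 0
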